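-- pv_equiv track=rewrite | github.com/MukhamejanKaratayev/lawtech-checker | src/archive/check_numeration_document old2.py | group_by_numeration
-- ===== SOURCE A (Python) =====
-- def group_by_numeration(items):
--     grouped_items = {}
--     for item in items:
--         main_numeration = item.split('-')[0].strip()
--         if main_numeration not in grouped_items:
--             grouped_items[main_numeration] = []
--         grouped_items[main_numeration].append(item)
--     return list(grouped_items.values())
-- ===== SOURCE B (Python) =====
-- def group_by_numeration(items):
--     keys = []
--     for item in items:
--         k = item.split('-')[0].strip()
--         if k not in keys:
--             keys.append(k)
--     return [[item for item in items if item.split('-')[0].strip() == k] for k in keys]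
-- ===== Notes on version B (the rewrite author's own statement) =====
-- stated objective: alternative
-- what changed: B first collects the distinct prefix keys in first-appearance order, then builds each group by an independent filtering pass over the items, instead of A's single pass that accumulates groups in a dict.
import Mathlib
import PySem

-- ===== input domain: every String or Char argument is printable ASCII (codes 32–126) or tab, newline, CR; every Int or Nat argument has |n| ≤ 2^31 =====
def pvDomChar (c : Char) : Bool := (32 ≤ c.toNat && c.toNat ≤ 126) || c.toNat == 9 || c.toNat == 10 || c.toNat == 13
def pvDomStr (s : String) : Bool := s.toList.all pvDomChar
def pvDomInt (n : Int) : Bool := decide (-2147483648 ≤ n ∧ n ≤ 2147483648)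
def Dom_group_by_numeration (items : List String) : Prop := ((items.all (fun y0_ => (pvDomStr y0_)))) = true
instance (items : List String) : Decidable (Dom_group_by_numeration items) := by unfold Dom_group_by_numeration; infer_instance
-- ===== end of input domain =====

-- B groups by first building the distinct prefix keys in first-appearance order and then
-- filtering the items once per key, instead of A's single dict-accumulating pass; same
-- values in the same order, an alternative decomposition (not claimed faster).

-- ===== PORT A =====
-- item.split('-')[0].strip(); split on a non-empty separator is never empty, so headD's
-- default is never used (exact).
def pvKey (item : String) : String :=
  PySem.Str.strip (((PySem.Str.split? item "-").getD []).headD "")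

def group_by_numeration (items : List String) : List (List String) :=
  (items.foldl (fun d item =>
      let k := pvKey item
      let d' := if d.contains k then d else d.insert k ([] : List String)
      d'.insert k (d'.getD k [] ++ [item]))
    PySem.Dict.empty).values

-- ===== PORT B =====
def group_by_numeration_alt (items : List String) : List (List String) :=
  let keys : List String := items.foldl (fun ks item =>
      let k := pvKey item
      if ks.contains k then ks else ks ++ [k]) []
  keys.map (fun k => items.filter (fun item => pvKey item == k))

-- ===== PRECONDITION & SPEC =====
def Spec_group_by_numeration (items : List String) (out : List (List String)) : Prop := out = group_by_numeration_alt items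
instance (items : List String) (out : List (List String)) : Decidable (Spec_group_by_numeration items out) := by unfold Spec_group_by_numeration; infer_instance

-- ===== CLAIM (what is proved, stated in full; the proofs are below) =====
def Claim_equal_group_by_numeration : Prop := ∀ (items : List String), Dom_group_by_numeration items → Spec_group_by_numeration items (group_by_numeration items)

-- ===== LEMMAS AND PROOFS =====

-- A's loop body is exactly dict.modify at the key (Python's setdefault-then-append pattern)
theorem pvStepA_eq_modify (d : PySem.Dict String (List String)) (item : String) :
    (let k := pvKey item
     let d' := if d.contains k then d else d.insert k ([] : List String)
     d'.insert k (d'.getD k [] ++ [item]))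
    = d.modify (pvKey item) [] (· ++ [item]) := by
  by_cases h : d.contains (pvKey item) = true
  · simp [h, PySem.Dict.modify]
  · simp only [Bool.not_eq_true] at h
    simp [h, PySem.Dict.modify, PySem.Dict.getD_insert_self,
      PySem.Dict.insert_insert_self, PySem.Dict.getD_of_not_contains _ _ h]

-- A's result: for each distinct key (first-appearance order), the items whose key matches
theorem pvA_eq (items : List String) :
    group_by_numeration items
    = (PySem.Set.ofList (items.map pvKey)).map
        (fun k => items.filter (fun item => pvKey item == k)) := by
  unfold group_by_numeration
  have hstep : (items.foldl (fun d item =>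
      let k := pvKey item
      let d' := if d.contains k then d else d.insert k ([] : List String)
      d'.insert k (d'.getD k [] ++ [item])) PySem.Dict.empty)
      = items.foldl (fun d item => d.modify (pvKey item) [] (· ++ [item])) PySem.Dict.empty := by
    congr 1
    funext d item
    exact pvStepA_eq_modify d item
  rw [hstep]
  set D := items.foldl (fun d item => d.modify (pvKey item) [] (· ++ [item])) PySem.Dict.empty with hD
  have hnd : D.keys.Nodup := by
    exact PySem.Dict.nodup_keys_foldl_modify_key items pvKey [] (fun _ item => (· ++ [item]))
      PySem.Dict.empty (by simp)
  have hkeys : D.keys = PySem.Set.ofList (items.map pvKey) := by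
    rw [hD, PySem.Dict.keys_foldl_modify_key items pvKey [] (fun _ item => (· ++ [item]))]
    simp [PySem.Dict.keys_empty, PySem.Set.update_nil_left]
  rw [PySem.Dict.values_eq_map_keys D hnd [], hkeys]
  apply List.map_congr_left
  intro k _
  have h := PySem.Dict.getD_foldl_modify_append
      (items.map (fun item => (pvKey item, item))) PySem.Dict.empty k
  rw [List.foldl_map] at h
  simp only [PySem.Dict.getD_empty, List.nil_append, List.filter_map, Function.comp_def] at h
  rw [hD, h]
  simp [Function.comp_def]

-- B's key loop is set(…) of the mapped keys, kept in first-appearance order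
theorem pvB_keys_eq (items : List String) :
    items.foldl (fun ks item =>
      let k := pvKey item
      if ks.contains k then ks else ks ++ [k]) []
    = PySem.Set.ofList (items.map pvKey) := by
  rw [← PySem.Set.update_nil_left, PySem.Set.update_map_eq_foldl_add]
  rfl

-- ===== VERDICT (by name: the statement is the Claim_ definition above) =====
theorem group_by_numeration_spec : Claim_equal_group_by_numeration := by
  intro items _
  unfold Spec_group_by_numeration
  rw [pvA_eq]
  unfold group_by_numeration_alt
  rw [pvB_keys_eq]
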